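-- pv_equiv track=rewrite | github.com/ChopinNo3Op9/Coding-Challenge | strictly increasing.py | consecutive_increasing_indices
-- ===== SOURCE A (Python) =====
-- def consecutive_increasing_indices(arr):
--     consecutive_indices = []
--     current_run = [arr[0]]
--
--     for i in range(1, len(arr)):
--         if arr[i] > arr[i - 1]:
--             current_run.append(arr[i])
--         else:
--             if len(current_run) > 1:
--                 consecutive_indices.append(current_run)
--             current_run = [arr[i]]
--
--     if len(current_run) > 1:
--         consecutive_indices.append(current_run)
--
--     return consecutive_indices
-- ===== SOURCE B (Python) =====
-- def consecutive_increasing_indices(arr):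
--     result = []
--     i, n = 0, len(arr)
--     while i < n:
--         j = i + 1
--         while j < n and arr[j] > arr[j - 1]:
--             j += 1
--         if j - i > 1:
--             result.append(arr[i:j])
--         i = j
--     return result
-- ===== Notes on version B (the rewrite author's own statement) =====
-- stated objective: alternative
-- what changed: B replaces A's single pass with an incrementally grown current-run list by a two-level scan that first locates the end of each strictly increasing run and then slices that run out of the array in one step.
import Mathlib
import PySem

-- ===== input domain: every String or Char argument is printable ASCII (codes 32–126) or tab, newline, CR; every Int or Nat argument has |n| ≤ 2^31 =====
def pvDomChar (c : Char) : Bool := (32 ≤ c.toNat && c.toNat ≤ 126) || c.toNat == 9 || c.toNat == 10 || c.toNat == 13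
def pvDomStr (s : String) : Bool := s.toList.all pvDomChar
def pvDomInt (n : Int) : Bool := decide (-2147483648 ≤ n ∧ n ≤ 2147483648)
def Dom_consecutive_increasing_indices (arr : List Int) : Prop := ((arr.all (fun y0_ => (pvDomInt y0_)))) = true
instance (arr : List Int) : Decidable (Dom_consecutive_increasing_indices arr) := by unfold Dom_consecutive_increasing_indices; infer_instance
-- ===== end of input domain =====

-- B replaces A's single pass with an incrementally grown current-run list by a two-level scan
-- that locates the end of each strictly increasing run and slices it out; same O(n) cost.

-- ===== PORT A =====
-- literal transliteration: state is (consecutive_indices, current_run); the initial element access raises on an empty list (none case, excluded by Pre_)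
def consecutive_increasing_indices (arr : List Int) : List (List Int) :=
  match PySem.List.pyGet? arr 0 with
  | none => []   -- IndexError on an empty list; outside Pre_
  | some a0 =>
    let st := (PySem.List.pyRange 1 (arr.length : Int) 1).foldl
      (fun (st : List (List Int) × List Int) i =>
        if PySem.List.pyGetD arr i 0 > PySem.List.pyGetD arr (i - 1) 0 then
          (st.1, st.2 ++ [PySem.List.pyGetD arr i 0])
        else
          ((if st.2.length > 1 then st.1 ++ [st.2] else st.1), [PySem.List.pyGetD arr i 0]))
      ([], [a0])
    if st.2.length > 1 then st.1 ++ [st.2] else st.1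

-- ===== PORT B =====
-- inner while loop: advance j while j < n and arr[j] > arr[j-1] (fuel only makes it total)
def pvFindEndAux (arr : List Int) : Nat → Nat → Nat
  | 0, j => j
  | fuel + 1, j =>
    if j < arr.length ∧ arr.getD (j - 1) 0 < arr.getD j 0 then pvFindEndAux arr fuel (j + 1) else j

def pvFindEnd (arr : List Int) (j : Nat) : Nat := pvFindEndAux arr (arr.length + 1 - j) j

-- outer while loop over i; appends the slice arr[i:j] when longer than 1 (fuel only makes it total)
def pvGoAux (arr : List Int) : Nat → Nat → List (List Int)
  | 0, _ => []
  | fuel + 1, i =>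
    if i < arr.length then
      (if 1 < pvFindEnd arr (i + 1) - i then [(arr.drop i).take (pvFindEnd arr (i + 1) - i)] else [])
        ++ pvGoAux arr fuel (pvFindEnd arr (i + 1))
    else []

def pvGo (arr : List Int) (i : Nat) : List (List Int) := pvGoAux arr (arr.length + 1 - i) i

def consecutive_increasing_indices_alt (arr : List Int) : List (List Int) :=
  pvGo arr 0

-- ===== PRECONDITION & SPEC =====
-- A reads the first element before looping, so it raises IndexError on an empty list; that is all Pre_ excludes (A returns no value there).
def Pre_consecutive_increasing_indices (arr : List Int) : Prop := arr ≠ []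
instance (arr : List Int) : Decidable (Pre_consecutive_increasing_indices arr) := by unfold Pre_consecutive_increasing_indices; infer_instance
def pvWitness_consecutive_increasing_indices : List Int := [1, 2, 0]

def Spec_consecutive_increasing_indices (arr : List Int) (out : List (List Int)) : Prop := out = consecutive_increasing_indices_alt arr
instance (arr : List Int) (out : List (List Int)) : Decidable (Spec_consecutive_increasing_indices arr out) := by unfold Spec_consecutive_increasing_indices; infer_instance

-- ===== CLAIM (what is proved, stated in full; the proofs are below) =====
def Claim_equal_consecutive_increasing_indices : Prop := ∀ (arr : List Int), Dom_consecutive_increasing_indices arr → Pre_consecutive_increasing_indices arr → Spec_consecutive_increasing_indices arr (consecutive_increasing_indices arr)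

-- ===== LEMMAS AND PROOFS =====

theorem pvFindEndAux_congr (arr : List Int) :
    ∀ f1 f2 j, arr.length - j < f1 → arr.length - j < f2 →
    pvFindEndAux arr f1 j = pvFindEndAux arr f2 j := by
  intro f1
  induction f1 with
  | zero => intro f2 j h1 _; omega
  | succ f1 ih =>
    intro f2 j h1 h2
    cases f2 with
    | zero => omega
    | succ f2 =>
      by_cases hc : j < arr.length ∧ arr.getD (j - 1) 0 < arr.getD j 0
      · rw [pvFindEndAux, pvFindEndAux, if_pos hc, if_pos hc]
        exact ih f2 (j + 1) (by omega) (by omega)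
      · rw [pvFindEndAux, pvFindEndAux, if_neg hc, if_neg hc]

theorem pvFindEnd_unfold (arr : List Int) (j : Nat) :
    pvFindEnd arr j
    = if j < arr.length ∧ arr.getD (j - 1) 0 < arr.getD j 0 then pvFindEnd arr (j + 1) else j := by
  unfold pvFindEnd
  by_cases hj : j < arr.length
  · rw [show arr.length + 1 - j = (arr.length - j) + 1 from by omega, pvFindEndAux]
    split
    · exact pvFindEndAux_congr arr (arr.length - j) (arr.length + 1 - (j + 1)) (j + 1)
        (by omega) (by omega)
    · rfl
  · rw [show arr.length + 1 - j = arr.length + 1 - j from rfl]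
    have : ¬ (j < arr.length ∧ arr.getD (j - 1) 0 < arr.getD j 0) := by
      rintro ⟨h, -⟩; omega
    rw [if_neg this]
    cases hz : arr.length + 1 - j with
    | zero => rfl
    | succ f => rw [pvFindEndAux, if_neg this]

theorem le_pvFindEndAux (arr : List Int) : ∀ fuel j, j ≤ pvFindEndAux arr fuel j := by
  intro fuel
  induction fuel with
  | zero => intro j; exact le_refl j
  | succ fuel ih =>
    intro j
    rw [pvFindEndAux]
    split
    · exact le_trans (by omega) (ih (j + 1))
    · exact le_refl j

theorem le_pvFindEnd (arr : List Int) (j : Nat) : j ≤ pvFindEnd arr j :=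
  le_pvFindEndAux arr _ j

theorem pvFindEndAux_le (arr : List Int) :
    ∀ fuel j, j ≤ arr.length → pvFindEndAux arr fuel j ≤ arr.length := by
  intro fuel
  induction fuel with
  | zero => intro j hj; exact hj
  | succ fuel ih =>
    intro j hj
    rw [pvFindEndAux]
    by_cases hc : j < arr.length ∧ arr.getD (j - 1) 0 < arr.getD j 0
    · rw [if_pos hc]; exact ih (j + 1) (by omega)
    · rw [if_neg hc]; exact hj

theorem pvFindEnd_le (arr : List Int) (j : Nat) (hj : j ≤ arr.length) :
    pvFindEnd arr j ≤ arr.length :=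
  pvFindEndAux_le arr _ j hj

theorem pvGoAux_congr (arr : List Int) :
    ∀ f1 f2 i, arr.length - i < f1 → arr.length - i < f2 →
    pvGoAux arr f1 i = pvGoAux arr f2 i := by
  intro f1
  induction f1 with
  | zero => intro f2 i h1 _; omega
  | succ f1 ih =>
    intro f2 i h1 h2
    cases f2 with
    | zero => omega
    | succ f2 =>
      by_cases hi : i < arr.length
      · have hle := le_pvFindEnd arr (i + 1)
        rw [pvGoAux, pvGoAux, if_pos hi, if_pos hi,
          ih f2 (pvFindEnd arr (i + 1)) (by omega) (by omega)]
      · rw [pvGoAux, pvGoAux, if_neg hi, if_neg hi]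

theorem pvGo_unfold (arr : List Int) (i : Nat) :
    pvGo arr i
    = if i < arr.length then
        (if 1 < pvFindEnd arr (i + 1) - i then [(arr.drop i).take (pvFindEnd arr (i + 1) - i)] else [])
          ++ pvGo arr (pvFindEnd arr (i + 1))
      else [] := by
  unfold pvGo
  by_cases hi : i < arr.length
  · rw [show arr.length + 1 - i = (arr.length - i) + 1 from by omega, pvGoAux, if_pos hi, if_pos hi]
    have hle := le_pvFindEnd arr (i + 1)
    have hub := pvFindEnd_le arr (i + 1) (by omega)
    rw [pvGoAux_congr arr (arr.length - i) (arr.length + 1 - pvFindEnd arr (i + 1))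
      (pvFindEnd arr (i + 1)) (by omega) (by omega)]
  · rw [if_neg hi]
    cases hz : arr.length + 1 - i with
    | zero => rfl
    | succ f => rw [pvGoAux, if_neg hi]

-- common spine: pvCollect a t = (maximal strictly increasing run starting at a, remainder)
def pvCollect (a : Int) : List Int → List Int × List Int
  | [] => ([a], [])
  | b :: t => if a < b then ((pvCollect b t).1.cons a, (pvCollect b t).2) else ([a], b :: t)

theorem pvCollect_append (a : Int) (t : List Int) :
    (pvCollect a t).1 ++ (pvCollect a t).2 = a :: t := by
  induction t generalizing a with
  | nil => rfl
  | cons b t ih =>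
    rw [pvCollect]
    split
    · simpa using ih b
    · rfl

theorem pvCollect_fst_length_pos (a : Int) (t : List Int) : 0 < (pvCollect a t).1.length := by
  cases t with
  | nil => simp [pvCollect]
  | cons b t => rw [pvCollect]; split <;> simp

theorem pvCollect_snd_length_le (a : Int) (t : List Int) : (pvCollect a t).2.length ≤ t.length := by
  induction t generalizing a with
  | nil => simp [pvCollect]
  | cons b t ih =>
    rw [pvCollect]
    split
    · exact le_trans (ih b) (by simp)
    · simp

def pvRuns : List Int → List (List Int)
  | [] => []
  | a :: t =>
    (if 1 < (pvCollect a t).1.length then [(pvCollect a t).1] else []) ++ pvRuns (pvCollect a t).2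
termination_by l => l.length
decreasing_by have := pvCollect_snd_length_le a t; simp; omega

-- ---- A-side: the fold over index pairs equals a fold over adjacent pairs ----
def pvStepA (st : List (List Int) × List Int) (p : Int × Int) : List (List Int) × List Int :=
  if p.1 < p.2 then (st.1, st.2 ++ [p.2])
  else ((if st.2.length > 1 then st.1 ++ [st.2] else st.1), [p.2])

def pvFinishA (st : List (List Int) × List Int) : List (List Int) :=
  if st.2.length > 1 then st.1 ++ [st.2] else st.1

theorem foldl_range_adj {β : Type} (f : β → Int × Int → β) :
    ∀ (t : List Int) (a : Int) (init : β),
    (List.range t.length).foldl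
      (fun st k => f st ((a :: t).getD k 0, (a :: t).getD (k + 1) 0)) init
    = ((a :: t).zip t).foldl f init := by
  intro t
  induction t with
  | nil => intro a init; rfl
  | cons b t ih =>
    intro a init
    rw [List.length_cons, List.range_succ_eq_map, List.foldl_cons, List.foldl_map]
    simpa using ih b (f init (a, b))

theorem foldl_pyRange_adj {β : Type} (f : β → Int × Int → β) (t : List Int) (a : Int) (init : β) :
    (PySem.List.pyRange 1 (((a :: t).length : Nat) : Int) 1).foldl
      (fun st i => f st (PySem.List.pyGetD (a :: t) (i - 1) 0, PySem.List.pyGetD (a :: t) i 0)) init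
    = ((a :: t).zip t).foldl f init := by
  rw [PySem.List.pyRange_one, List.foldl_map]
  have hn : (((((a :: t).length : Nat) : Int)) - 1).toNat = t.length := by
    simp
  rw [hn, ← foldl_range_adj f t a init]
  apply List.foldl_ext
  intro st k _
  have h1 : (1 : Int) + (k : Int) - 1 = ((k : Nat) : Int) := by ring
  have h2 : (1 : Int) + (k : Int) = (((k + 1 : Nat)) : Int) := by push_cast; ring
  rw [h1, h2, PySem.List.pyGetD_natCast, PySem.List.pyGetD_natCast]

theorem foldA_key :
    ∀ (t : List Int) (a : Int) (ci : List (List Int)) (pre : List Int),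
    pvFinishA (((a :: t).zip t).foldl pvStepA (ci, pre ++ [a]))
    = ci ++ (if 1 < pre.length + (pvCollect a t).1.length then [pre ++ (pvCollect a t).1] else [])
         ++ pvRuns (pvCollect a t).2 := by
  intro t
  induction t with
  | nil =>
    intro a ci pre
    simp only [List.zip_nil_right, List.foldl_nil, pvCollect, pvFinishA, pvRuns]
    split_ifs with h1 h2 h2 <;> simp_all
  | cons b t ih =>
    intro a ci pre
    simp only [List.zip_cons_cons, List.foldl_cons]
    by_cases hab : a < b
    · have hstep : pvStepA (ci, pre ++ [a]) (a, b) = (ci, (pre ++ [a]) ++ [b]) := by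
        simp [pvStepA, hab]
      rw [hstep, ih b ci (pre ++ [a])]
      simp only [pvCollect, if_pos hab]
      simp only [List.length_append, List.length_cons, List.length_nil, Nat.zero_add,
        List.append_assoc, List.cons_append, List.nil_append]
      rw [show pre.length + 1 + (pvCollect b t).1.length
            = pre.length + ((pvCollect b t).1.length + 1) from by omega]
      rfl
    · have hstep : pvStepA (ci, pre ++ [a]) (a, b)
          = ((if (pre ++ [a]).length > 1 then ci ++ [pre ++ [a]] else ci), [] ++ [b]) := by
        simp [pvStepA, hab]
      rw [hstep, ih b _ []]
      simp only [pvCollect, if_neg hab]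
      rw [pvRuns]
      simp only [List.length_append, List.length_cons, List.length_nil, List.nil_append]
      split_ifs <;> simp_all [List.append_assoc]

-- ---- B-side: pvFindEnd / pvGo compute pvCollect / pvRuns ----
theorem getD_append_len (pre : List Int) (a : Int) (t : List Int) :
    (pre ++ a :: t).getD pre.length 0 = a := by
  simp [List.getD]

theorem pvFindEnd_eq :
    ∀ (t : List Int) (a : Int) (pre : List Int),
    pvFindEnd (pre ++ a :: t) (pre.length + 1) = pre.length + (pvCollect a t).1.length := by
  intro t
  induction t with
  | nil =>
    intro a pre
    rw [pvFindEnd_unfold]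
    have hnot : ¬ (pre.length + 1 < (pre ++ [a]).length ∧
        (pre ++ [a]).getD (pre.length + 1 - 1) 0 < (pre ++ [a]).getD (pre.length + 1) 0) := by
      rintro ⟨h, -⟩; simp at h
    rw [if_neg hnot]
    simp [pvCollect]
  | cons b t ih =>
    intro a pre
    rw [pvFindEnd_unfold]
    have hlen : pre.length + 1 < (pre ++ a :: b :: t).length := by simp
    have hga : (pre ++ a :: b :: t).getD (pre.length + 1 - 1) 0 = a := by
      simp
    have hgb : (pre ++ a :: b :: t).getD (pre.length + 1) 0 = b := by
      have := getD_append_len (pre ++ [a]) b t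
      simp only [List.append_assoc, List.cons_append, List.nil_append, List.length_append,
        List.length_cons, List.length_nil, Nat.zero_add] at this ⊢
      exact this
    by_cases hab : a < b
    · rw [if_pos (⟨hlen, by rw [hga, hgb]; exact hab⟩ :
          pre.length + 1 < (pre ++ a :: b :: t).length ∧ _)]
      have hre : pre ++ a :: b :: t = (pre ++ [a]) ++ b :: t := by simp
      have hlen2 : pre.length + 1 + 1 = (pre ++ [a]).length + 1 := by simp
      rw [hre, hlen2, ih b (pre ++ [a])]
      simp [pvCollect, hab]
      omega
    · rw [if_neg (by rintro ⟨-, h⟩; rw [hga, hgb] at h; exact hab h)]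
      simp [pvCollect, hab]

theorem pvGo_eq (xs : List Int) : ∀ i, pvGo xs i = pvRuns (xs.drop i) := by
  have H : ∀ m i, xs.length - i ≤ m → pvGo xs i = pvRuns (xs.drop i) := by
    intro m
    induction m with
    | zero =>
      intro i h
      have hge : xs.length ≤ i := by omega
      rw [pvGo_unfold, if_neg (by omega), List.drop_eq_nil_of_le hge, pvRuns]
    | succ m ih =>
      intro i h
      by_cases hi : i < xs.length
      · rw [pvGo_unfold, if_pos hi]
        have hsplit : xs = xs.take i ++ xs[i] :: xs.drop (i + 1) := by
          conv_lhs => rw [← List.take_append_drop i xs]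
          rw [List.drop_eq_getElem_cons hi]
        have hlen : (xs.take i).length = i := by simp [List.length_take]; omega
        set a := xs[i] with ha
        set t := xs.drop (i + 1) with ht
        have hfe : pvFindEnd xs (i + 1) = i + (pvCollect a t).1.length := by
          conv_lhs => rw [hsplit]
          rw [← hlen]
          conv_lhs => rw [hlen]
          rw [show i + 1 = (xs.take i).length + 1 by omega]
          rw [pvFindEnd_eq t a (xs.take i), hlen]
        have hdrop : xs.drop i = a :: t := List.drop_eq_getElem_cons hi
        have hc := pvCollect_append a t
        have hpos := pvCollect_fst_length_pos a t
        have htake : (xs.drop i).take (i + (pvCollect a t).1.length - i) = (pvCollect a t).1 := by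
          rw [hdrop, show i + (pvCollect a t).1.length - i = (pvCollect a t).1.length by omega,
              ← hc, List.take_left]
        have hdrop2 : xs.drop (i + (pvCollect a t).1.length) = (pvCollect a t).2 := by
          rw [← List.drop_drop, hdrop, ← hc, List.drop_left]
        show (if 1 < pvFindEnd xs (i + 1) - i then
                [(xs.drop i).take (pvFindEnd xs (i + 1) - i)] else [])
              ++ pvGo xs (pvFindEnd xs (i + 1)) = pvRuns (xs.drop i)
        rw [hfe, ih (i + (pvCollect a t).1.length) (by omega), hdrop2, htake, hdrop, pvRuns]
        congr 1
        split_ifs <;> first | rfl | omega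
      · rw [pvGo_unfold, if_neg hi, List.drop_eq_nil_of_le (by omega), pvRuns]
  intro i
  exact H (xs.length - i) i (le_refl _)

-- ===== VERDICT (by name: the statement is the Claim_ definition above) =====
theorem consecutive_increasing_indices_spec : Claim_equal_consecutive_increasing_indices := by
  intro arr _ hpre
  unfold Spec_consecutive_increasing_indices
  cases arr with
  | nil => exact absurd rfl hpre
  | cons a t =>
    show consecutive_increasing_indices (a :: t) = consecutive_increasing_indices_alt (a :: t)
    have hB : consecutive_increasing_indices_alt (a :: t) = pvRuns (a :: t) := by
      unfold consecutive_increasing_indices_alt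
      simpa using pvGo_eq (a :: t) 0
    have hA : consecutive_increasing_indices (a :: t)
        = pvFinishA (((a :: t).zip t).foldl pvStepA ([], [a])) := by
      unfold consecutive_increasing_indices
      rw [show PySem.List.pyGet? (a :: t) 0 = some a from by
        simp [PySem.List.pyGet?, PySem.List.pyIdx?]]
      exact congrArg pvFinishA (foldl_pyRange_adj pvStepA t a ([], [a]))
    rw [hA, hB]
    have hk := foldA_key t a [] []
    simp only [List.nil_append, List.length_nil, Nat.zero_add] at hk
    rw [hk, pvRuns]
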